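-- pv_equiv track=rewrite | github.com/yashkahalkar/ADGM-Corporate-Agent | components/compliance_checker.py | _find_paragraph_location
-- ===== SOURCE A (Python) =====
-- def _find_paragraph_location(content: str, position: int) -> str:
--     """Find paragraph containing the position"""
--     lines = content.split('\n')
--     current_pos = 0
--
--     for i, line in enumerate(lines):
--         if current_pos <= position <= current_pos + len(line):
--             return f'Paragraph {i + 1}: {line[:50]}...' if len(line) > 50 else f'Paragraph {i + 1}: {line}'
--         current_pos += len(line) + 1  # +1 for newline
--
--     return 'Unknown location'
-- ===== SOURCE B (Python) =====
-- def _find_paragraph_location(content: str, position: int) -> str: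
--     """Find paragraph containing the position"""
--     if position < 0 or position > len(content):
--         return 'Unknown location'
--     i = content[:position].count('\n')
--     line = content.split('\n')[i]
--     if len(line) > 50:
--         return f'Paragraph {i + 1}: {line[:50]}...'
--     return f'Paragraph {i + 1}: {line}'
-- ===== Notes on version B (the rewrite author's own statement) =====
-- stated objective: simpler
-- what changed: Replaces A's enumerate loop with a running position accumulator by a range guard plus a direct computation of the line index as content[:position].count('\n') and one list indexing into content.split('\n').
import Mathlib
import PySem

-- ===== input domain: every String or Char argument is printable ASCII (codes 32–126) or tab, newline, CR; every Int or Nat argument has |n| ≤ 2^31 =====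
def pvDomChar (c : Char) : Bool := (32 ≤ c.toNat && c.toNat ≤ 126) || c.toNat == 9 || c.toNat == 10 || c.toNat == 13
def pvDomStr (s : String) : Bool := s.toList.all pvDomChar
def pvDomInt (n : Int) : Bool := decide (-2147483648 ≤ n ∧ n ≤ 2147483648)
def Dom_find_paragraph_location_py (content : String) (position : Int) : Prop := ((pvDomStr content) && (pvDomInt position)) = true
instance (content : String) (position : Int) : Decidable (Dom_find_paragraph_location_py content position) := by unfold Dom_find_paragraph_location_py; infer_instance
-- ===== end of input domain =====

-- B replaces A's enumerate loop (running position accumulator) by a range guard plus a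
-- direct newline count that yields the line index; objective: simpler. Both programs are
-- total and proved equal on the whole domain.

-- ===== PORT A =====
-- the `for i, line in enumerate(lines)` loop: state = index i, current_pos
def pvGoA : List (List Char) → Int → Int → Int → String
  | [], _, _, _ => "Unknown location"
  | line :: rest, i, current_pos, position =>
    if current_pos ≤ position ∧ position ≤ current_pos + (line.length : Int) then
      if (line.length : Int) > 50 then
        "Paragraph " ++ PySem.Int.toStr (i + 1) ++ ": " ++ (PySem.List.slice line none (some 50)).asString ++ "..."
      else
        "Paragraph " ++ PySem.Int.toStr (i + 1) ++ ": " ++ line.asString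
    else pvGoA rest (i + 1) (current_pos + (line.length : Int) + 1) position

def find_paragraph_location_py (content : String) (position : Int) : String :=
  let lines := PySem.Chars.splitOn content.toList ['\n']
  pvGoA lines 0 0 position

-- ===== PORT B =====
def find_paragraph_location_py_alt (content : String) (position : Int) : String :=
  if position < 0 ∨ position > PySem.Str.len content then "Unknown location"
  else
    let i : Nat := PySem.Chars.count (PySem.List.slice content.toList none (some position)) ['\n']
    -- lines[i]: the index is provably in range here (i ≤ number of newlines), so Python's
    -- indexing cannot raise; ported as List.getD, which equals lines[i] on in-range indices
    let line : List Char := (PySem.Chars.splitOn content.toList ['\n']).getD i []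
    if (line.length : Int) > 50 then
      "Paragraph " ++ PySem.Int.toStr ((i : Int) + 1) ++ ": " ++ (PySem.List.slice line none (some 50)).asString ++ "..."
    else
      "Paragraph " ++ PySem.Int.toStr ((i : Int) + 1) ++ ": " ++ line.asString

-- ===== PRECONDITION & SPEC =====
def Spec_find_paragraph_location_py (content : String) (position : Int) (out : String) : Prop := out = find_paragraph_location_py_alt content position
instance (content : String) (position : Int) (out : String) : Decidable (Spec_find_paragraph_location_py content position out) := by unfold Spec_find_paragraph_location_py; infer_instance

-- ===== CLAIM (what is proved, stated in full; the proofs are below) =====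
def Claim_equal_find_paragraph_location_py : Prop := ∀ (content : String) (position : Int), Dom_find_paragraph_location_py content position → Spec_find_paragraph_location_py content position (find_paragraph_location_py content position)

-- ===== LEMMAS AND PROOFS =====

-- PySem.Chars.splitOn with a single-character separator is Mathlib's List.splitOn
theorem pv_splitOn_go_single (c : Char) : ∀ (fuel : Nat) (l cur : List Char) (acc : List (List Char)) (_ : l.length ≤ fuel),
    PySem.Chars.splitOn.go [c] fuel l cur acc
      = acc.reverse ++ (l.splitOn c).modifyHead (cur.reverse ++ ·) := by
  intro fuel
  induction fuel with
  | zero =>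
    intro l cur acc h
    have : l = [] := List.eq_nil_of_length_eq_zero (Nat.le_zero.mp h)
    subst this
    simp [PySem.Chars.splitOn.go.eq_1, List.splitOn_nil]
  | succ fuel ih =>
    intro l cur acc h
    cases l with
    | nil => simp [PySem.Chars.splitOn.go.eq_2 [c] (fuel+1) cur acc (by omega), List.splitOn_nil]
    | cons x rest =>
      rw [PySem.Chars.splitOn.go.eq_3]
      by_cases hx : x = c
      · subst hx
        rw [if_pos (by simp [List.isPrefixOf])]
        rw [ih _ [] _ (by simpa using Nat.le_of_succ_le_succ h)]
        simp [List.splitOn, List.splitOnP_cons, List.modifyHead]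
        split <;> simp_all
      · have hpre : List.isPrefixOf [c] (x :: rest) = false := by
          simp [List.isPrefixOf]
          intro hc; exact absurd hc.symm hx
        rw [if_neg (by simp [hpre])]
        rw [ih _ (x :: cur) _ (by simpa using Nat.le_of_succ_le_succ h)]
        simp only [List.splitOn, List.splitOnP_cons]
        have hxc : (x == c) = false := by simp [hx]
        rw [hxc]
        simp only [Bool.false_eq_true, if_false, List.modifyHead_modifyHead]
        congr 2
        funext a
        simp

theorem pv_splitOn_single (cs : List Char) (c : Char) :
    PySem.Chars.splitOn cs [c] = cs.splitOn c := by
  unfold PySem.Chars.splitOn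
  rw [pv_splitOn_go_single c _ _ _ _ (by omega)]
  cases h : cs.splitOn c <;> simp [List.modifyHead]

-- PySem.Chars.count with a single-character pattern is List.count
theorem pv_count_go_single (c : Char) : ∀ (fuel : Nat) (l : List Char) (acc : Nat) (_ : l.length ≤ fuel),
    PySem.Chars.count.go [c] fuel l acc = acc + l.count c := by
  intro fuel
  induction fuel with
  | zero =>
    intro l acc h
    have : l = [] := List.eq_nil_of_length_eq_zero (Nat.le_zero.mp h)
    subst this
    simp [PySem.Chars.count.go.eq_1]
  | succ fuel ih =>
    intro l acc h
    cases l with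
    | nil => simp [PySem.Chars.count.go.eq_2 [c] (fuel+1) acc (by omega)]
    | cons x rest =>
      rw [PySem.Chars.count.go.eq_3]
      by_cases hx : x = c
      · subst hx
        rw [if_pos (by simp [List.isPrefixOf])]
        rw [ih _ _ (by simpa using Nat.le_of_succ_le_succ h)]
        simp
        omega
      · have hpre : List.isPrefixOf [c] (x :: rest) = false := by
          simp [List.isPrefixOf]
          intro hc; exact absurd hc.symm hx
        rw [if_neg (by simp [hpre])]
        rw [ih _ _ (by simpa using Nat.le_of_succ_le_succ h)]
        simp [hx]

theorem pv_count_single (cs : List Char) (c : Char) :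
    PySem.Chars.count cs [c] = cs.count c := by
  unfold PySem.Chars.count
  rw [if_neg (by simp)]
  rw [pv_count_go_single c _ _ _ (by omega)]
  omega

-- joining the split pieces back with the separator
def pvJoin (c : Char) : List (List Char) → List Char
  | [] => []
  | [l] => l
  | l :: r :: t => l ++ c :: pvJoin c (r :: t)

theorem pv_join_splitOn (c : Char) (cs : List Char) : pvJoin c (cs.splitOn c) = cs := by
  induction cs with
  | nil => simp [List.splitOn_nil, pvJoin]
  | cons x rest ih =>
    simp only [List.splitOn, List.splitOnP_cons] at *
    by_cases hx : x = c
    · subst hx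
      rw [show (x == x) = true from by simp]
      simp only [if_pos]
      have hne := List.splitOnP_ne_nil (fun a => a == x) rest
      cases h : List.splitOnP (fun a => a == x) rest with
      | nil => exact absurd h hne
      | cons l0 t =>
        rw [h] at ih
        simpa [pvJoin] using ih
    · rw [show (x == c) = false from by simp [hx]]
      simp only [Bool.false_eq_true, if_false]
      have hne := List.splitOnP_ne_nil (fun a => a == c) rest
      cases h : List.splitOnP (fun a => a == c) rest with
      | nil => exact absurd h hne
      | cons l0 t =>
        rw [h] at ih
        cases t with
        | nil => simpa [pvJoin, List.modifyHead] using ih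
        | cons r t' => simpa [pvJoin, List.modifyHead] using ih

-- no piece of the split contains the separator
theorem pv_splitOn_free (c : Char) (cs : List Char) : ∀ l ∈ cs.splitOn c, c ∉ l := by
  induction cs with
  | nil => simp [List.splitOn_nil]
  | cons x rest ih =>
    simp only [List.splitOn, List.splitOnP_cons] at *
    by_cases hx : x = c
    · subst hx
      rw [show (x == x) = true from by simp]
      simp only [if_pos]
      intro l hl
      rcases List.mem_cons.mp hl with h | h
      · subst h; simp
      · exact ih l h
    · rw [show (x == c) = false from by simp [hx]]
      simp only [Bool.false_eq_true, if_false]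
      intro l hl
      have hne := List.splitOnP_ne_nil (fun a => a == c) rest
      cases h : List.splitOnP (fun a => a == c) rest with
      | nil => exact absurd h hne
      | cons l0 t =>
        rw [h] at hl ih
        simp only [List.modifyHead] at hl
        rcases List.mem_cons.mp hl with h' | h'
        · subst h'
          intro hmem
          rcases List.mem_cons.mp hmem with h'' | h''
          · exact hx h''.symm
          · exact ih l0 (List.mem_cons_self ..) h''
        · exact ih l (List.mem_cons_of_mem _ h')

-- the rendered paragraph string (shared shape of both ports' returns)
def pvRender (k : Int) (line : List Char) : String :=
  if (line.length : Int) > 50 then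
    "Paragraph " ++ PySem.Int.toStr (k + 1) ++ ": " ++ (PySem.List.slice line none (some 50)).asString ++ "..."
  else
    "Paragraph " ++ PySem.Int.toStr (k + 1) ++ ": " ++ line.asString

theorem pv_count_take_free {c : Char} {l : List Char} (hfree : c ∉ l) (n : Nat) :
    (l.take n).count c = 0 :=
  List.count_eq_zero.mpr (fun h => hfree (List.mem_of_mem_take h))

-- characterisation of A's loop over any nonempty separator-free piece list
theorem pv_goA_eq (c : Char) : ∀ (L : List (List Char)) (_ : L ≠ []) (_ : ∀ l ∈ L, c ∉ l)
    (i current_pos position : Int),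
    pvGoA L i current_pos position =
      if position < current_pos ∨ position > current_pos + ((pvJoin c L).length : Int) then
        "Unknown location"
      else
        pvRender (i + (((pvJoin c L).take (position - current_pos).toNat).count c : Int))
          (L.getD (((pvJoin c L).take (position - current_pos).toNat).count c) []) := by
  intro L
  induction L with
  | nil => intro h; exact absurd rfl h
  | cons l rest ih =>
    intro _ hfree i cur p
    have hfl : c ∉ l := hfree l (List.mem_cons_self ..)
    cases rest with
    | nil =>
      rw [pvGoA]
      rw [show pvJoin c [l] = l from rfl]
      by_cases hin : cur ≤ p ∧ p ≤ cur + (l.length : Int)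
      · rw [if_pos hin]
        conv_rhs => rw [if_neg (show ¬(p < cur ∨ p > cur + (l.length : Int)) by omega)]
        rw [pv_count_take_free hfl]
        simp [pvRender, List.getD]
      · rw [if_neg hin, if_pos (by omega)]
        rw [pvGoA]
    | cons r t =>
      rw [pvGoA]
      have hjoin : pvJoin c (l :: r :: t) = l ++ c :: pvJoin c (r :: t) := rfl
      have hlen : ((pvJoin c (l :: r :: t)).length : Int)
          = (l.length : Int) + 1 + ((pvJoin c (r :: t)).length : Int) := by
        rw [hjoin]; push_cast [List.length_append, List.length_cons]; ring
      by_cases hin : cur ≤ p ∧ p ≤ cur + (l.length : Int)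
      · rw [if_pos hin]
        have hnot : ¬(p < cur ∨ p > cur + ((pvJoin c (l :: r :: t)).length : Int)) := by omega
        conv_rhs => rw [if_neg hnot]
        have htake : (pvJoin c (l :: r :: t)).take (p - cur).toNat
            = l.take (p - cur).toNat := by
          rw [hjoin]
          exact List.take_append_of_le_length (by omega)
        rw [htake, pv_count_take_free hfl]
        simp [pvRender, List.getD]
      · rw [if_neg hin]
        rw [ih (by simp) (fun l' hl' => hfree l' (List.mem_cons_of_mem _ hl')) (i+1) (cur + (l.length : Int) + 1) p]
        by_cases hlow : p < cur
        · rw [if_pos (by omega), if_pos (by omega)]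
        · -- p > cur + |l|, hence p ≥ cur + |l| + 1
          have hgt : p > cur + (l.length : Int) := by omega
          have hcond : (p < cur + (l.length : Int) + 1 ∨ p > cur + (l.length : Int) + 1 + ((pvJoin c (r :: t)).length : Int))
              ↔ (p < cur ∨ p > cur + ((pvJoin c (l :: r :: t)).length : Int)) := by omega
          rw [if_congr hcond rfl rfl]
          by_cases hout : p < cur ∨ p > cur + ((pvJoin c (l :: r :: t)).length : Int)
          · rw [if_pos hout, if_pos hout]
          · rw [if_neg hout, if_neg hout]
            have htake : (pvJoin c (l :: r :: t)).take (p - cur).toNat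
                = l ++ c :: (pvJoin c (r :: t)).take (p - (cur + (l.length : Int) + 1)).toNat := by
              rw [hjoin, List.take_append, List.take_of_length_le (by omega)]
              congr 1
              have hn : (p - cur).toNat - l.length = ((p - (cur + (l.length : Int) + 1)).toNat) + 1 := by omega
              rw [hn, List.take_succ_cons]
            rw [htake]
            rw [List.count_append, List.count_cons_self]
            have hcl : List.count c l = 0 := List.count_eq_zero.mpr hfl
            rw [hcl]
            set k := List.count c (List.take (p - (cur + (l.length : Int) + 1)).toNat (pvJoin c (r :: t))) with hk
            have h1 : (0 + (k + 1)) = k + 1 := by omega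
            rw [h1]
            have hgetD : (l :: r :: t).getD (k + 1) [] = (r :: t).getD k [] := rfl
            rw [hgetD]
            congr 1
            push_cast; ring

-- ===== VERDICT (by name: the statement is the Claim_ definition above) =====
theorem find_paragraph_location_py_spec : Claim_equal_find_paragraph_location_py := by
  intro content position _
  unfold Spec_find_paragraph_location_py
  unfold find_paragraph_location_py find_paragraph_location_py_alt
  simp only [pv_splitOn_single, pv_count_single, PySem.Str.len_eq]
  rw [pv_goA_eq '\n' (List.splitOn '\n' content.toList) (by unfold List.splitOn; exact List.splitOnP_ne_nil _ _) (pv_splitOn_free '\n' _) 0 0 position]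
  rw [pv_join_splitOn]
  by_cases hout : position < 0 ∨ position > (content.toList.length : Int)
  · rw [if_pos (by omega), if_pos hout]
  · rw [if_neg (by omega), if_neg hout]
    have hpos : (0 : Int) ≤ position := by omega
    rw [PySem.List.slice_to _ hpos]
    simp only [sub_zero, zero_add, pvRender]
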